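-- pv_equiv track=rewrite | github.com/intelligentracing/learn_python_hw | learn_Python assignment/test_ch13_YQS.py | deleteHead
-- ===== SOURCE A (Python) =====
-- def deleteHead(orign, value):
--     stack = []
--     while orign:
--         stack.append(orign.pop())
--     stack.pop()
--     while stack:
--         orign.append(stack.pop())
--
--     return orign
-- ===== SOURCE B (Python) =====
-- def deleteHead(orign, value):
--     orign.pop(0)
--     return orign
-- ===== Notes on version B (the rewrite author's own statement) =====
-- stated objective: simpler
-- what changed: B deletes the head directly with a single in-place pop(0) instead of emptying the list into an auxiliary stack and rebuilding it with two reversal loops.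
import Mathlib
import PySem

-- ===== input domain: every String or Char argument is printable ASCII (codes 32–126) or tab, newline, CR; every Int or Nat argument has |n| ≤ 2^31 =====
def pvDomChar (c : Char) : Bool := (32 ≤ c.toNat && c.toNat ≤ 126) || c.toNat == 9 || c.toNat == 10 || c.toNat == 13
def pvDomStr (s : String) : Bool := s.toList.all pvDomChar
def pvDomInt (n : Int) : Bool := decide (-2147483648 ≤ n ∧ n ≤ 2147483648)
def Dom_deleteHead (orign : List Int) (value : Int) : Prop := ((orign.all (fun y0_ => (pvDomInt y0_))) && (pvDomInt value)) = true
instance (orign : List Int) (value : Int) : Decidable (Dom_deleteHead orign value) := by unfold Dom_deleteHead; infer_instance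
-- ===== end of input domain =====

-- ===== PORT A =====
-- B replaces A's stack-and-two-reversal-loops rebuild by a single in-place pop(0); both
-- mutate the argument in place in Python (same final state) — the claim is about the return value.
-- while <xs>: <acc>.append(<xs>.pop())  — pops from the END of xs; used for both of A's loops.
def pvPopAll (xs acc : List Int) : List Int :=
  if h : xs = [] then acc
  else pvPopAll xs.dropLast (acc ++ [xs.getLast h])
termination_by xs.length
decreasing_by
  have : 0 < xs.length := List.length_pos_iff.mpr h
  simp [List.length_dropLast]; omega

def deleteHead (orign : List Int) (value : Int) : List Int :=
  -- stack = []; while orign: stack.append(orign.pop())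
  let stack := pvPopAll orign []
  -- stack.pop()  (raises IndexError on empty stack, excluded by Pre_)
  let stack := stack.dropLast
  -- while stack: orign.append(stack.pop());  orign is empty at this point
  pvPopAll stack []

-- ===== PORT B =====
def deleteHead_alt (orign : List Int) (value : Int) : List Int :=
  -- orign.pop(0); return orign   (pop? = none only on [], excluded by Pre_)
  match PySem.List.pop? orign 0 with
  | some (_, rest) => rest
  | none => []

-- ===== PRECONDITION & SPEC =====
-- Pre_ excludes exactly the empty list, on which A (stack.pop()) raises IndexError.
def Pre_deleteHead (orign : List Int) (value : Int) : Prop := orign ≠ []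
instance (orign : List Int) (value : Int) : Decidable (Pre_deleteHead orign value) := by unfold Pre_deleteHead; infer_instance
def pvWitness_deleteHead : List Int × Int := ([3, 1, 2], 0)
def Spec_deleteHead (orign : List Int) (value : Int) (out : List Int) : Prop := out = deleteHead_alt orign value
instance (orign : List Int) (value : Int) (out : List Int) : Decidable (Spec_deleteHead orign value out) := by unfold Spec_deleteHead; infer_instance

-- ===== CLAIM (what is proved, stated in full; the proofs are below) =====
def Claim_equal_deleteHead : Prop := ∀ (orign : List Int) (value : Int), Dom_deleteHead orign value → Pre_deleteHead orign value → Spec_deleteHead orign value (deleteHead orign value)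

-- ===== LEMMAS AND PROOFS =====
theorem pvPopAll_eq (xs acc : List Int) : pvPopAll xs acc = acc ++ xs.reverse := by
  induction xs using List.reverseRecOn generalizing acc with
  | nil => rw [pvPopAll]; simp
  | append_singleton ys y ih =>
      rw [pvPopAll]
      simp [List.dropLast_concat, ih]

-- ===== VERDICT (by name: the statement is the Claim_ definition above) =====
theorem deleteHead_spec : Claim_equal_deleteHead := by
  intro orign value _ hpre
  unfold Spec_deleteHead deleteHead deleteHead_alt
  cases orign with
  | nil => exact absurd rfl hpre
  | cons a l =>
      simp [pvPopAll_eq, PySem.List.pop?, PySem.List.pyIdx?]
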